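-- pv_equiv track=rewrite | github.com/stefanoandroni/advent-of-code | 2022/day-18/main.py | get_min_coordinates
-- ===== SOURCE A (Python) =====
-- def get_min_coordinates(C):
--     x_min, y_min, z_min = C.pop()
--
--     for c in C:
--         x, y, z = c
--         if x < x_min:
--             x_min = x
--         if y < y_min:
--             y_min = y
--         if z < z_min:
--             z_min = z
--
--     return x_min, y_min, z_min
-- ===== SOURCE B (Python) =====
-- def get_min_coordinates(C):
--     first = C.pop()
--     return tuple(map(min, zip(first, *C)))
-- ===== Notes on version B (the rewrite author's own statement) =====
-- stated objective: idiomatic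
-- what changed: Replaces the fused loop tracking three running minima with a transpose (zip) of the coordinates followed by an independent min over each axis column.
-- outside the precondition, e.g. on get_min_coordinates(set()): A raises, B raises
import Mathlib
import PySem

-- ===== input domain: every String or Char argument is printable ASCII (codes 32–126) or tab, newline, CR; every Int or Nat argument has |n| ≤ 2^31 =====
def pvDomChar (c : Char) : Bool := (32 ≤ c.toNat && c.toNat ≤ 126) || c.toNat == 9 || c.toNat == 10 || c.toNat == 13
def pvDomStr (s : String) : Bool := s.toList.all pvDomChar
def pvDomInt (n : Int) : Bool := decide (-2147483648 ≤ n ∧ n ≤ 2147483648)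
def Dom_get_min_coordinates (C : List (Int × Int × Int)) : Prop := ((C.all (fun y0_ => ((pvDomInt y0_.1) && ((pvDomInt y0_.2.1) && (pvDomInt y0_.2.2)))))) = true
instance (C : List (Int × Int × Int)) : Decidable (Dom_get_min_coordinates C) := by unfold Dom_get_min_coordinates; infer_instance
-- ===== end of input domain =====

-- B transposes the coordinates and takes the min of each axis column instead of the
-- fused three-minima loop (objective: idiomatic). Both pop C's last element in Python
-- (an observable mutation of the argument) and raise on the empty collection; the equivalence
-- proved here is about the return value only, on non-empty C.
-- ===== PORT A =====
def get_min_coordinates (C : List (Int × Int × Int)) : Int × Int × Int :=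
  match C.getLast? with
  | none => (0, 0, 0)   -- Python raises here; excluded by Pre_
  | some m0 =>
    C.dropLast.foldl (fun m c =>
      let m1 := if c.1 < m.1 then c.1 else m.1
      let m2 := if c.2.1 < m.2.1 then c.2.1 else m.2.1
      let m3 := if c.2.2 < m.2.2 then c.2.2 else m.2.2
      (m1, m2, m3)) m0

-- ===== PORT B =====
def get_min_coordinates_alt (C : List (Int × Int × Int)) : Int × Int × Int :=
  match C.getLast? with
  | none => (0, 0, 0)   -- Python raises here; excluded by Pre_
  | some first =>
    let rest := C.dropLast
    ((rest.map (·.1)).foldl min first.1,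
     (rest.map (·.2.1)).foldl min first.2.1,
     (rest.map (·.2.2)).foldl min first.2.2)

-- ===== PRECONDITION & SPEC =====
-- Pre_ excludes the empty list, on which A (C.pop()) raises.
def Pre_get_min_coordinates (C : List (Int × Int × Int)) : Prop := C ≠ []
instance (C : List (Int × Int × Int)) : Decidable (Pre_get_min_coordinates C) := by
  unfold Pre_get_min_coordinates; infer_instance
def pvWitness_get_min_coordinates : (List (Int × Int × Int)) := [(1, 2, 3), (0, 5, -1)]

def Spec_get_min_coordinates (C : List (Int × Int × Int)) (out : Int × Int × Int) : Prop := out = get_min_coordinates_alt C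
instance (C : List (Int × Int × Int)) (out : Int × Int × Int) : Decidable (Spec_get_min_coordinates C out) := by unfold Spec_get_min_coordinates; infer_instance

-- ===== CLAIM (what is proved, stated in full; the proofs are below) =====
def Claim_equal_get_min_coordinates : Prop := ∀ (C : List (Int × Int × Int)), Dom_get_min_coordinates C → Pre_get_min_coordinates C → Spec_get_min_coordinates C (get_min_coordinates C)

-- ===== LEMMAS AND PROOFS =====
theorem fused_foldl (l : List (Int × Int × Int)) (a : Int × Int × Int) :
    l.foldl (fun m c =>
      let m1 := if c.1 < m.1 then c.1 else m.1
      let m2 := if c.2.1 < m.2.1 then c.2.1 else m.2.1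
      let m3 := if c.2.2 < m.2.2 then c.2.2 else m.2.2
      (m1, m2, m3)) a
    = ((l.map (·.1)).foldl min a.1,
       (l.map (·.2.1)).foldl min a.2.1,
       (l.map (·.2.2)).foldl min a.2.2) := by
  induction l generalizing a with
  | nil => simp
  | cons c t ih =>
    simp only [List.foldl_cons, List.map_cons, ih]
    congr 1
    · simp only [min_def]; split_ifs <;> omega
    congr 1
    · simp only [min_def]; split_ifs <;> omega
    · simp only [min_def]; split_ifs <;> omega

-- ===== VERDICT (by name: the statement is the Claim_ definition above) =====
theorem get_min_coordinates_spec : Claim_equal_get_min_coordinates := by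
  intro C _ _
  unfold Spec_get_min_coordinates get_min_coordinates get_min_coordinates_alt
  cases h : C.getLast? with
  | none => rfl
  | some first => simp [fused_foldl]
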